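-- pv_equiv track=rewrite | github.com/DonnyZhao/codility-solutions | lesson2/MaxCounters.py | solution
-- ===== SOURCE A (Python) =====
-- def solution(N, A):
--     counters = [0] * N
--     min_value = 0
--     max_counter = 0
--
--     for i in A:
--         if i <= N:
--             counters[i - 1] = max(counters[i - 1], min_value)
--             counters[i - 1] += 1
--             max_counter = max(max_counter, counters[i - 1])
--         else:
--             min_value = max_counter
--
--     for i in range(N):
--         if counters[i] < min_value:
--             counters[i] = min_value
--
--     return counters
-- ===== SOURCE B (Python) =====
-- def solution(N, A):
--     counters = [0] * N
--     max_counter = 0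
--     for i in A:
--         if i <= N:
--             counters[i - 1] += 1
--             if counters[i - 1] > max_counter:
--                 max_counter = counters[i - 1]
--         else:
--             counters = [max_counter] * N
--     return counters
-- ===== Notes on version B (the rewrite author's own statement) =====
-- stated objective: simpler
-- what changed: B is the naive direct version: a max-all operation immediately overwrites the whole array with [max_counter]*N, removing A's lazy min_value bookkeeping and its final reconciliation pass.
import Mathlib
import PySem

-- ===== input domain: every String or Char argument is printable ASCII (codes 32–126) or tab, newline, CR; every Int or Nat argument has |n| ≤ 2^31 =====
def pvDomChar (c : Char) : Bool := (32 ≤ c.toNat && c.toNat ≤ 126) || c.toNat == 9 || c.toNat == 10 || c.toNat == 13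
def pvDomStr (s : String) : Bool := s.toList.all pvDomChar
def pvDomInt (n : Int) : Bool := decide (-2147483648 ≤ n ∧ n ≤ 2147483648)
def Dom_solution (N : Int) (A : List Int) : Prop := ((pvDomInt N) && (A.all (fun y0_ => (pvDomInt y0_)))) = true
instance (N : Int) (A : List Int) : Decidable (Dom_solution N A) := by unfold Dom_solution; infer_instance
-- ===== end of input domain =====

-- B replaces A's lazy min_value bookkeeping and final reconciliation pass by the naive direct
-- version that overwrites the whole array on a max-all operation (simpler; not faster).

-- ===== PORT A =====
-- one iteration of A's main loop over the state (counters, min_value, max_counter)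
def solutionStep (N : Int) (s : List Int × Int × Int) (i : Int) : List Int × Int × Int :=
  let cs := s.1
  let mv := s.2.1
  let mc := s.2.2
  if i ≤ N then
    -- counters[i-1] = max(counters[i-1], min_value)
    let cs1 := PySem.List.pySetD cs (i - 1) (max (PySem.List.pyGetD cs (i - 1) 0) mv)
    -- counters[i-1] += 1
    let cs2 := PySem.List.pySetD cs1 (i - 1) (PySem.List.pyGetD cs1 (i - 1) 0 + 1)
    -- max_counter = max(max_counter, counters[i-1])
    (cs2, mv, max mc (PySem.List.pyGetD cs2 (i - 1) 0))
  else
    (cs, mc, mc)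

def solution (N : Int) (A : List Int) : List Int :=
  let s := A.foldl (solutionStep N) (List.replicate N.toNat (0 : Int), (0 : Int), (0 : Int))
  -- for i in range(N): if counters[i] < min_value: counters[i] = min_value
  (PySem.List.pyRange 0 N 1).foldl
    (fun cs j => if PySem.List.pyGetD cs j 0 < s.2.1 then PySem.List.pySetD cs j s.2.1 else cs) s.1

-- ===== PORT B =====
-- one iteration of B's loop over the state (counters, max_counter)
def solutionAltStep (N : Int) (s : List Int × Int) (i : Int) : List Int × Int :=
  let cs := s.1
  let mc := s.2
  if i ≤ N then
    let cs1 := PySem.List.pySetD cs (i - 1) (PySem.List.pyGetD cs (i - 1) 0 + 1)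
    let v := PySem.List.pyGetD cs1 (i - 1) 0
    (cs1, if v > mc then v else mc)
  else
    (List.replicate N.toNat mc, mc)

def solution_alt (N : Int) (A : List Int) : List Int :=
  (A.foldl (solutionAltStep N) (List.replicate N.toNat (0 : Int), (0 : Int))).1

-- ===== PRECONDITION & SPEC =====
-- Pre_ excludes exactly the inputs on which both Pythons raise IndexError:
-- some i ∈ A with i ≤ N whose Python index i-1 is out of range for the length-max(N,0) list.
def Pre_solution (N : Int) (A : List Int) : Prop :=
  ∀ i ∈ A, i ≤ N → PySem.Raise.InRange N.toNat (i - 1)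
instance (N : Int) (A : List Int) : Decidable (Pre_solution N A) := by
  unfold Pre_solution; infer_instance

def pvWitness_solution : Int × List Int := (3, [1, 2, 3, 4, 1, 2])

def Spec_solution (N : Int) (A : List Int) (out : List Int) : Prop := out = solution_alt N A
instance (N : Int) (A : List Int) (out : List Int) : Decidable (Spec_solution N A out) := by
  unfold Spec_solution; infer_instance

-- ===== CLAIM (what is proved, stated in full; the proofs are below) =====
def Claim_equal_solution : Prop :=
  ∀ (N : Int) (A : List Int), Dom_solution N A → Pre_solution N A →
    Spec_solution N A (solution N A)

-- ===== LEMMAS AND PROOFS =====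

theorem pyIdx_of_inRange (n : Nat) (i : Int) (h : PySem.Raise.InRange n i) :
    ∃ k, PySem.List.pyIdx? n i = some k ∧ k < n := by
  obtain ⟨h1, h2⟩ := h
  unfold PySem.List.pyIdx?
  by_cases h0 : 0 ≤ i
  · exact ⟨i.toNat, by simp [h0, h2], by omega⟩
  · exact ⟨n - (-i).toNat, by simp [h0, h1], by omega⟩

theorem pyGetD_of_idx {xs : List Int} {i : Int} {k : Nat} (d : Int)
    (h : PySem.List.pyIdx? xs.length i = some k) :
    PySem.List.pyGetD xs i d = xs.getD k d := by
  simp [PySem.List.pyGetD, PySem.List.pyGet?, h, List.getD]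

theorem pySetD_of_idx {xs : List Int} {i : Int} {k : Nat} (v : Int)
    (h : PySem.List.pyIdx? xs.length i = some k) :
    PySem.List.pySetD xs i v = xs.set k v := by
  simp [PySem.List.pySetD, PySem.List.pySet?, h]

-- the main-loop invariant: B's state is (A's counters maxed with min_value, A's max_counter)
theorem main_inv (N : Int) (A : List Int)
    (hA : ∀ i ∈ A, i ≤ N → PySem.Raise.InRange N.toNat (i - 1)) :
    ∀ (cs : List Int) (mv mc : Int),
      cs.length = N.toNat → mv ≤ mc → (∀ x ∈ cs, x ≤ mc) →
      (A.foldl (solutionAltStep N) (cs.map (fun x => max x mv), mc)).1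
          = (A.foldl (solutionStep N) (cs, mv, mc)).1.map
              (fun x => max x (A.foldl (solutionStep N) (cs, mv, mc)).2.1)
        ∧ (A.foldl (solutionAltStep N) (cs.map (fun x => max x mv), mc)).2
            = (A.foldl (solutionStep N) (cs, mv, mc)).2.2
        ∧ (A.foldl (solutionStep N) (cs, mv, mc)).1.length = N.toNat
        ∧ (A.foldl (solutionStep N) (cs, mv, mc)).2.1
            ≤ (A.foldl (solutionStep N) (cs, mv, mc)).2.2
        ∧ ∀ x ∈ (A.foldl (solutionStep N) (cs, mv, mc)).1,
            x ≤ (A.foldl (solutionStep N) (cs, mv, mc)).2.2 := by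
  induction A with
  | nil =>
    intro cs mv mc hlen hmvmc hbd
    exact ⟨rfl, rfl, hlen, hmvmc, hbd⟩
  | cons i rest ih =>
    intro cs mv mc hlen hmvmc hbd
    have hrest : ∀ j ∈ rest, j ≤ N → PySem.Raise.InRange N.toNat (j - 1) := by
      intro j hj; exact hA j (List.mem_cons_of_mem _ hj)
    by_cases hi : i ≤ N
    · obtain ⟨k, hk, hklt⟩ := pyIdx_of_inRange N.toNat (i - 1) (hA i List.mem_cons_self hi)
      have hklt' : k < cs.length := by omega
      -- A's step
      have hkA : PySem.List.pyIdx? cs.length (i - 1) = some k := by rw [hlen]; exact hk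
      have hgA : PySem.List.pyGetD cs (i - 1) 0 = cs.getD k 0 := pyGetD_of_idx 0 hkA
      have hsA : PySem.List.pySetD cs (i - 1) (max (PySem.List.pyGetD cs (i - 1) 0) mv)
          = cs.set k (max (cs.getD k 0) mv) := by rw [hgA]; exact pySetD_of_idx _ hkA
      have hlen1 : (cs.set k (max (cs.getD k 0) mv)).length = cs.length := by simp
      have hk1 : PySem.List.pyIdx? (cs.set k (max (cs.getD k 0) mv)).length (i - 1) = some k := by
        rw [hlen1]; exact hkA
      have hg1 : PySem.List.pyGetD (cs.set k (max (cs.getD k 0) mv)) (i - 1) 0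
          = max (cs.getD k 0) mv := by
        rw [pyGetD_of_idx 0 hk1, List.getD, List.getElem?_set_self (by simpa using hklt')]
        simp
      have hstepA : solutionStep N (cs, mv, mc) i
          = (cs.set k (max (cs.getD k 0) mv + 1), mv, max mc (max (cs.getD k 0) mv + 1)) := by
        show (if i ≤ N then _ else _) = _
        rw [if_pos hi]
        have hs2 : PySem.List.pySetD (cs.set k (max (cs.getD k 0) mv)) (i - 1)
            (PySem.List.pyGetD (cs.set k (max (cs.getD k 0) mv)) (i - 1) 0 + 1)
            = cs.set k (max (cs.getD k 0) mv + 1) := by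
          rw [hg1, pySetD_of_idx _ hk1, List.set_set]
        have hg2 : PySem.List.pyGetD (cs.set k (max (cs.getD k 0) mv + 1)) (i - 1) 0
            = max (cs.getD k 0) mv + 1 := by
          have hk2 : PySem.List.pyIdx? (cs.set k (max (cs.getD k 0) mv + 1)).length (i - 1)
              = some k := by simpa using hkA
          rw [pyGetD_of_idx 0 hk2, List.getD, List.getElem?_set_self (by simpa using hklt')]
          simp
        simp only [hsA, hs2, hg2]
      -- B's step
      have hlenB : (cs.map (fun x => max x mv)).length = cs.length := by simp
      have hkB : PySem.List.pyIdx? (cs.map (fun x => max x mv)).length (i - 1) = some k := by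
        rw [hlenB]; exact hkA
      have hgB : PySem.List.pyGetD (cs.map (fun x => max x mv)) (i - 1) 0
          = max (cs.getD k 0) mv := by
        rw [pyGetD_of_idx 0 hkB, List.getD, List.getElem?_map,
          List.getElem?_eq_getElem (by simpa using hklt')]
        simp [List.getD, List.getElem?_eq_getElem hklt']
      have hsetB : PySem.List.pySetD (cs.map (fun x => max x mv)) (i - 1)
          (max (cs.getD k 0) mv + 1)
          = (cs.map (fun x => max x mv)).set k (max (cs.getD k 0) mv + 1) :=
        pySetD_of_idx _ hkB
      have hgB2 : PySem.List.pyGetD ((cs.map (fun x => max x mv)).set k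
            (max (cs.getD k 0) mv + 1)) (i - 1) 0 = max (cs.getD k 0) mv + 1 := by
        have hk3 : PySem.List.pyIdx? ((cs.map (fun x => max x mv)).set k
            (max (cs.getD k 0) mv + 1)).length (i - 1) = some k := by
          simpa using hkA
        rw [pyGetD_of_idx 0 hk3, List.getD,
          List.getElem?_set_self (by simp; omega)]
        simp
      have hstepB : solutionAltStep N (cs.map (fun x => max x mv), mc) i
          = ((cs.map (fun x => max x mv)).set k (max (cs.getD k 0) mv + 1),
              max mc (max (cs.getD k 0) mv + 1)) := by
        show (if i ≤ N then _ else _) = _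
        rw [if_pos hi]
        simp only [hgB, hsetB, hgB2]
        congr 1
        by_cases hvc : max (cs.getD k 0) mv + 1 > mc
        · rw [if_pos hvc]; exact (max_eq_right (by omega)).symm
        · rw [if_neg hvc]; exact (max_eq_left (by omega)).symm
      -- map commutes with set
      have hmapset : (cs.map (fun x => max x mv)).set k (max (cs.getD k 0) mv + 1)
          = (cs.set k (max (cs.getD k 0) mv + 1)).map (fun x => max x mv) := by
        rw [List.map_set]
        congr 1
        omega
      rw [List.foldl_cons, List.foldl_cons, hstepA, hstepB, hmapset]
      apply ih hrest
      · simpa using hlen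
      · omega
      · intro x hx
        rcases List.mem_or_eq_of_mem_set hx with hx' | hx'
        · exact le_trans (hbd x hx') (le_max_left _ _)
        · subst hx'
          have : cs.getD k 0 ∈ cs := by
            rw [List.getD, List.getElem?_eq_getElem hklt']
            exact List.getElem_mem _
          have := hbd _ this
          omega
    · -- max-all operation: B overwrites, A records min_value = max_counter
      have hstepA : solutionStep N (cs, mv, mc) i = (cs, mc, mc) := by
        show (if i ≤ N then _ else _) = _
        rw [if_neg hi]
      have hrepl : List.replicate N.toNat mc = cs.map (fun x => max x mc) := by
        symm
        rw [List.eq_replicate_iff]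
        refine ⟨by simpa using hlen, ?_⟩
        intro b hb
        obtain ⟨x, hx, hxb⟩ := List.mem_map.mp hb
        have := hbd x hx
        omega
      have hstepB : solutionAltStep N (cs.map (fun x => max x mv), mc) i
          = (cs.map (fun x => max x mc), mc) := by
        show (if i ≤ N then _ else _) = _
        rw [if_neg hi, hrepl]
      rw [List.foldl_cons, List.foldl_cons, hstepA, hstepB]
      apply ih hrest
      · exact hlen
      · exact le_refl mc
      · exact hbd

-- A's final reconciliation loop computes the pointwise max with min_value
theorem final_loop (mv : Int) (b : Nat) :
    ∀ (cs : List Int), b ≤ cs.length →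
    (PySem.List.pyRange 0 (b : Int) 1).foldl
      (fun w j => if PySem.List.pyGetD w j 0 < mv then PySem.List.pySetD w j mv else w) cs
    = (cs.take b).map (fun x => max x mv) ++ cs.drop b := by
  induction b with
  | zero => intro cs _; simp
  | succ n ih =>
    intro cs hb
    have hn : n < cs.length := by omega
    have hcast : ((n + 1 : Nat) : Int) = (n : Int) + 1 := by push_cast; ring
    rw [hcast, PySem.List.pyRange_one_succ_right (by positivity), List.foldl_append,
      List.foldl_cons, List.foldl_nil, ih cs (by omega)]
    set w := (cs.take n).map (fun x => max x mv) ++ cs.drop n with hc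
    have hclen : w.length = cs.length := by simp [hc]; omega
    have hlen1 : ((cs.take n).map (fun x => max x mv)).length = n := by simp; omega
    have hkc : PySem.List.pyIdx? w.length ((n : Nat) : Int) = some n := by
      unfold PySem.List.pyIdx?
      rw [if_pos (by positivity), if_pos (by exact_mod_cast hclen ▸ hn)]
      simp
    have hgc : w[n]? = cs[n]? := by
      rw [hc, List.getElem?_append_right (by rw [hlen1]), hlen1, Nat.sub_self,
        List.getElem?_drop, Nat.add_zero]
    have hg : PySem.List.pyGetD w ((n : Nat) : Int) 0 = cs.getD n 0 := by
      rw [pyGetD_of_idx 0 hkc]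
      simp [List.getD, hgc]
    have htarget : (cs.take (n + 1)).map (fun x => max x mv) ++ cs.drop (n + 1)
        = w.set n (max (cs.getD n 0) mv) := by
      rw [hc, List.set_append, if_neg (by rw [hlen1]; omega), hlen1, Nat.sub_self,
        List.drop_eq_getElem_cons hn, List.set_cons_zero,
        List.take_add_one, List.getElem?_eq_getElem hn]
      simp [List.getD, List.getElem?_eq_getElem hn]
      rw [List.take_add_one, List.getElem?_map, List.getElem?_eq_getElem hn]
      simp
    rw [hg]
    by_cases hlt : cs.getD n 0 < mv
    · rw [if_pos hlt, pySetD_of_idx _ hkc, htarget, max_eq_right (by omega)]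
    · rw [if_neg hlt, htarget, max_eq_left (by omega)]
      have hcg : cs.getD n 0 = w.getD n 0 := by simp [List.getD, hgc]
      rw [hcg, List.getD_eq_getElem w 0 (by omega), List.set_getElem_self]

-- ===== VERDICT (by name: the statement is the Claim_ definition above) =====
theorem solution_spec : Claim_equal_solution := by
  intro N A _ hpre
  unfold Spec_solution solution solution_alt
  have hinv := main_inv N A hpre (List.replicate N.toNat 0) 0 0
    (by simp) (le_refl 0) (by intro x hx; simp at hx; omega)
  have hmap0 : (List.replicate N.toNat (0 : Int)).map (fun x => max x 0)
      = List.replicate N.toNat (0 : Int) := by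
    rw [List.map_replicate]; simp
  rw [hmap0] at hinv
  obtain ⟨hB, _, hlenA, _, _⟩ := hinv
  set sA := A.foldl (solutionStep N) (List.replicate N.toNat (0 : Int), (0 : Int), (0 : Int))
  by_cases hN : 0 ≤ N
  · have hNcast : ((N.toNat : Nat) : Int) = N := by omega
    have := final_loop sA.2.1 N.toNat sA.1 (by omega)
    rw [hNcast] at this
    rw [this, hB, List.take_of_length_le (by omega), List.drop_of_length_le (by omega),
      List.append_nil]
  · have hnil : PySem.List.pyRange 0 N 1 = [] := PySem.List.pyRange_one_eq_nil (by omega)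
    have hAnil : sA.1 = [] := by
      have : N.toNat = 0 := by omega
      rw [this] at hlenA
      exact List.eq_nil_of_length_eq_zero hlenA
    rw [hnil, List.foldl_nil, hB, hAnil]
    simp
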